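-- pv_equiv track=rewrite | github.com/jordangumm/kaggle_mania | miniconda/pkgs/.install.py | duplicates_to_remove
-- ===== SOURCE A (Python) =====
-- def name_dist(dist):
--     return dist.rsplit('-', 2)[0]
--
-- def duplicates_to_remove(linked_dists, keep_dists):
--     """
--     Returns the (sorted) list of distributions to be removed, such that
--     only one distribution (for each name) remains.  `keep_dists` is an
--     interable of distributions (which are not allowed to be removed).
--     """
--     from collections import defaultdict
--
--     keep_dists = set(keep_dists)
--     ldists = defaultdict(set) # map names to set of distributions
--     for dist in linked_dists:
--         name = name_dist(dist)
--         ldists[name].add(dist)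
--
--     res = set()
--     for dists in ldists.values():
--         # `dists` is the group of packages with the same name
--         if len(dists) == 1:
--             # if there is only one package, nothing has to be removed
--             continue
--         if dists & keep_dists:
--             # if the group has packages which are have to be kept, we just
--             # take the set of packages which are in group but not in the
--             # ones which have to be kept
--             res.update(dists - keep_dists)
--         else:
--             # otherwise, we take lowest (n-1) (sorted) packages
--             res.update(sorted(dists)[:-1])
--     return sorted(res)
-- ===== SOURCE B (Python) =====
-- def name_dist(dist):
--     return dist.rsplit('-', 2)[0]
--
-- def duplicates_to_remove(linked_dists, keep_dists):
--     """
--     One aggregation pass computing (count, max, has-kept) per name, then a single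
--     filter over the globally sorted deduplicated list: no sets of group members,
--     no per-group removal sets, no final sort of a union.
--     """
--     keep = set(keep_dists)
--     stats = {}
--     for d in set(linked_dists):
--         n = name_dist(d)
--         c, m, h = stats.get(n, (0, d, False))
--         stats[n] = (c + 1, max(m, d), h or d in keep)
--     res = []
--     for d in sorted(set(linked_dists)):
--         c, m, h = stats[name_dist(d)]
--         if c == 1:
--             continue
--         if h:
--             if d not in keep:
--                 res.append(d)
--         else:
--             if d != m:
--                 res.append(d)
--     return res
-- ===== Notes on version B (the rewrite author's own statement) =====
-- stated objective: alternative
-- what changed: A groups dists into a dict of member sets by name, builds per-group removal sets (set difference or sorted-group-minus-last) and sorts their union; B makes one aggregation pass recording only (count, max, has-kept) per name and then emits the result as a single filter over the globally sorted deduplicated list, so the member sets, the union set and the final sort disappear.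
import Mathlib
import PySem

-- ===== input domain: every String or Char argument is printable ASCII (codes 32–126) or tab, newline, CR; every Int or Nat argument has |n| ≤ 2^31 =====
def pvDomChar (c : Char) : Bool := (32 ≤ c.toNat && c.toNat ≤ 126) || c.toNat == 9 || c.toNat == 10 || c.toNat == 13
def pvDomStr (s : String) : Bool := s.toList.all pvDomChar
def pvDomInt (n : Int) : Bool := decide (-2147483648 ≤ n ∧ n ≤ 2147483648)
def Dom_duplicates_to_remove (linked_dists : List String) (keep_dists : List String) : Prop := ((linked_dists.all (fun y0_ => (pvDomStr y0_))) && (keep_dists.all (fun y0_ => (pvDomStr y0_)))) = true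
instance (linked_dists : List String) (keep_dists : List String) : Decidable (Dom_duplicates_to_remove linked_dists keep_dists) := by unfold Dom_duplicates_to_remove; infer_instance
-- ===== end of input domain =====

-- B replaces A's dict-of-member-sets grouping, per-group removal sets and final sort of their union
-- by one aggregation pass (per name: count, max, has-a-kept-dist) followed by a single filter over
-- the globally sorted deduplicated list; same values, different decomposition.

-- ===== PORT A =====
-- dist.rsplit('-', 2)[0], ported by hand (no PySem rsplit): dropping the last '-'-segment twice
-- is exact for rsplit with maxsplit=2 taken at index 0.
def dropLastSeg (cs : List Char) : List Char :=
  match cs.reverse.dropWhile (fun c => c ≠ '-') with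
  | [] => cs
  | _ :: t => t.reverse

def name_dist (dist : String) : String :=
  String.ofList (dropLastSeg (dropLastSeg dist.toList))

def duplicates_to_remove (linked_dists : List String) (keep_dists : List String) : List String :=
  let keep := PySem.Set.ofList keep_dists
  let ldists := linked_dists.foldl
    (fun dd dist => dd.modify (name_dist dist) [] (fun s => PySem.Set.add s dist))
    PySem.Dict.empty
  let res := (PySem.Dict.values ldists).foldl
    (fun res dists =>
      if PySem.Set.len dists == 1 then res
      else if !(PySem.Set.inter dists keep).isEmpty then
        PySem.Set.update res (PySem.Set.diff dists keep)
      else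
        PySem.Set.update res (PySem.List.slice (PySem.List.sorted dists (fun x => x) false) none (some (-1))))
    PySem.Set.empty
  PySem.List.sorted res (fun x => x) false

-- ===== PORT B =====
-- the aggregation pass of Source B: per name (count, running max, has-an-element-of-keep)
def statsOf (keep dset : List String) : PySem.Dict String (Int × String × Bool) :=
  dset.foldl
    (fun st d =>
      st.insert (name_dist d)
        ((st.getD (name_dist d) ((0 : Int), d, false)).1 + 1,
         max (st.getD (name_dist d) ((0 : Int), d, false)).2.1 d,
         (st.getD (name_dist d) ((0 : Int), d, false)).2.2 || PySem.Set.contains keep d))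
    PySem.Dict.empty

def duplicates_to_remove_alt (linked_dists : List String) (keep_dists : List String) : List String :=
  let keep := PySem.Set.ofList keep_dists
  let stats := statsOf keep (PySem.Set.ofList linked_dists)
  (PySem.List.sorted (PySem.Set.ofList linked_dists) (fun x => x) false).foldl
    (fun res d =>
      if (stats.getD (name_dist d) ((0 : Int), "", false)).1 == 1 then res
      else if (stats.getD (name_dist d) ((0 : Int), "", false)).2.2 then
        (if !(PySem.Set.contains keep d) then res ++ [d] else res)
      else
        (if !(d == (stats.getD (name_dist d) ((0 : Int), "", false)).2.1) then res ++ [d] else res))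
    []

-- ===== PRECONDITION & SPEC =====
def Spec_duplicates_to_remove (linked_dists : List String) (keep_dists : List String) (out : List String) : Prop := out = duplicates_to_remove_alt linked_dists keep_dists
instance (linked_dists : List String) (keep_dists : List String) (out : List String) : Decidable (Spec_duplicates_to_remove linked_dists keep_dists out) := by unfold Spec_duplicates_to_remove; infer_instance

-- ===== CLAIM (what is proved, stated in full; the proofs are below) =====
def Claim_equal_duplicates_to_remove : Prop := ∀ (linked_dists : List String) (keep_dists : List String), Dom_duplicates_to_remove linked_dists keep_dists → Spec_duplicates_to_remove linked_dists keep_dists (duplicates_to_remove linked_dists keep_dists)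

-- ===== LEMMAS AND PROOFS =====

-- the contribution of one name-group to A's removal set
def contribA (keep g : List String) : List String :=
  if PySem.Set.len g == 1 then []
  else if !(PySem.Set.inter g keep).isEmpty then PySem.Set.diff g keep
  else PySem.List.slice (PySem.List.sorted g (fun x => x) false) none (some (-1))

-- B's per-element removal predicate (reading the aggregates of statsOf)
def predB (keep dset : List String) (d : String) : Bool :=
  !(((statsOf keep dset).getD (name_dist d) ((0 : Int), "", false)).1 == 1) &&
    (if ((statsOf keep dset).getD (name_dist d) ((0 : Int), "", false)).2.2
       then !(PySem.Set.contains keep d)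
     else !(d == ((statsOf keep dset).getD (name_dist d) ((0 : Int), "", false)).2.1))

-- A's grouping dict: value at key k is the set of dists whose name is k
theorem dict_getD (l : List String) (dd : PySem.Dict String (List String)) (k : String) :
    (l.foldl (fun dd dist => dd.modify (name_dist dist) [] (fun s => PySem.Set.add s dist)) dd).getD k []
      = PySem.Set.update (dd.getD k []) (l.filter (fun e => name_dist e == k)) := by
  induction l generalizing dd with
  | nil => simp [PySem.Set.update]
  | cons x xs ih =>
    simp only [List.foldl_cons, List.filter_cons]
    rw [ih]
    by_cases h : name_dist x = k
    · subst h
      simp [PySem.Dict.getD_modify_self, PySem.Set.update_cons]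
    · rw [PySem.Dict.getD_modify_of_ne]
      · simp [beq_iff_eq, h]
      · exact fun hk => h hk.symm

-- Set.ofList commutes with filter
theorem ofList_filter (q : String → Bool) (l : List String) :
    PySem.Set.ofList (l.filter q) = (PySem.Set.ofList l).filter q := by
  induction l using List.reverseRecOn with
  | nil => rfl
  | append_singleton xs x ih =>
    rw [List.filter_append, PySem.Set.ofList_append_singleton]
    by_cases hq : q x = true
    · simp only [List.filter_cons, hq, if_pos, List.filter_nil]
      rw [PySem.Set.ofList_append_singleton, ih]
      by_cases hm : x ∈ PySem.Set.ofList xs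
      · rw [PySem.Set.add_of_mem hm, PySem.Set.add_of_mem]
        simp [List.mem_filter, hm, hq]
      · rw [PySem.Set.add_of_not_mem hm, PySem.Set.add_of_not_mem, List.filter_append]
        · simp [hq]
        · simp only [List.mem_filter]; exact fun h => hm h.1
    · simp only [List.filter_cons, hq, List.filter_nil]
      rw [if_neg (by simp), List.append_nil, ih]
      by_cases hm : x ∈ PySem.Set.ofList xs
      · rw [PySem.Set.add_of_mem hm]
      · rw [PySem.Set.add_of_not_mem hm, List.filter_append]
        simp [hq]

-- the aggregation dict of B: value at key n summarizes the dists named n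
theorem statsOf_get? (keep S : List String) (n : String) :
    (statsOf keep S).get? n
      = match S.filter (fun e => name_dist e == n) with
        | [] => none
        | a :: t => some ((((a :: t).length : Nat) : Int), t.foldl max a,
            (a :: t).any (fun e => PySem.Set.contains keep e)) := by
  induction S using List.reverseRecOn with
  | nil => simp [statsOf]
  | append_singleton xs x ih =>
    unfold statsOf at ih ⊢
    rw [List.foldl_append, List.foldl_cons, List.foldl_nil, List.filter_append]
    by_cases hn : (name_dist x == n) = true
    · have hxn : name_dist x = n := by simpa using hn
      rw [hxn, PySem.Dict.get?_insert_self]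
      cases hfe : xs.filter (fun e => name_dist e == n) with
      | nil =>
        have h0 := ih; rw [hfe] at h0
        rw [hxn] at *
        rw [PySem.Dict.getD_of_get?_eq_none _ _ h0]
        simp [hn]
      | cons a t =>
        have h0 := ih; rw [hfe] at h0
        rw [hxn] at *
        rw [PySem.Dict.getD_of_get?_eq_some _ _ h0]
        simp only [List.filter_cons, hn, if_pos, List.filter_nil, List.length_cons, List.any_cons]
        refine congrArg some ?_
        refine Prod.ext ?_ (Prod.ext ?_ ?_)
        · simp only [List.append_eq, List.length_append, List.length_cons, List.length_nil]
          push_cast; ring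
        · rw [List.append_eq, List.foldl_append, List.foldl_cons, List.foldl_nil]
        · simp [List.append_eq, Bool.or_assoc]
    · have hxn : ¬ (n = name_dist x) := fun h => hn (beq_iff_eq.mpr h.symm)
      rw [PySem.Dict.get?_insert_of_ne _ _ hxn, ih]
      have hfx : List.filter (fun e => name_dist e == n) [x] = [] := by
        rw [List.filter_cons, eq_false_of_ne_true hn]
        rfl
      rw [hfx, List.append_nil]

-- membership in A's res-accumulating fold
theorem mem_resfold (keep : List String) (vals : List (List String)) (s : List String) (y : String) :
    (y ∈ vals.foldl
      (fun res dists =>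
        if PySem.Set.len dists == 1 then res
        else if !(PySem.Set.inter dists keep).isEmpty then
          PySem.Set.update res (PySem.Set.diff dists keep)
        else
          PySem.Set.update res (PySem.List.slice (PySem.List.sorted dists (fun x => x) false) none (some (-1)))) s)
      ↔ y ∈ s ∨ ∃ g ∈ vals, y ∈ contribA keep g := by
  induction vals generalizing s with
  | nil => simp
  | cons g gs ih =>
    simp only [List.foldl_cons, ih, List.exists_mem_cons_iff]
    have hstep : (y ∈ (if PySem.Set.len g == 1 then s
        else if !(PySem.Set.inter g keep).isEmpty then PySem.Set.update s (PySem.Set.diff g keep)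
        else PySem.Set.update s (PySem.List.slice (PySem.List.sorted g (fun x => x) false) none (some (-1)))))
        ↔ y ∈ s ∨ y ∈ contribA keep g := by
      unfold contribA
      split_ifs with h1 h2 <;> simp [PySem.Set.mem_update]
    rw [hstep]
    tauto

theorem nodup_resfold (keep : List String) (vals : List (List String)) (s : List String) (hs : s.Nodup) :
    (vals.foldl
      (fun res dists =>
        if PySem.Set.len dists == 1 then res
        else if !(PySem.Set.inter dists keep).isEmpty then
          PySem.Set.update res (PySem.Set.diff dists keep)
        else
          PySem.Set.update res (PySem.List.slice (PySem.List.sorted dists (fun x => x) false) none (some (-1)))) s).Nodup := by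
  induction vals generalizing s with
  | nil => exact hs
  | cons g gs ih =>
    simp only [List.foldl_cons]
    apply ih
    split_ifs with h1 h2
    · exact hs
    · exact PySem.Set.nodup_update _ _ hs
    · exact PySem.Set.nodup_update _ _ hs

-- dropLast of a strictly increasing nonempty list = everything but the last (largest) element
theorem mem_dropLast_strict (s : List String) (hp : s.Pairwise (· < ·)) (hne : s ≠ []) (y : String) :
    (y ∈ s.dropLast ↔ y ∈ s ∧ y ≠ s.getLast hne) := by
  have hsplit := (List.dropLast_concat_getLast hne).symm
  have hlt : ∀ z ∈ s.dropLast, z < s.getLast hne := by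
    have := hp
    rw [hsplit] at this
    intro z hz
    exact (List.pairwise_append.mp this).2.2 z hz _ (List.mem_singleton_self _)
  constructor
  · intro h
    refine ⟨List.mem_of_mem_dropLast h, ?_⟩
    intro he
    exact absurd (hlt y h) (by simp [he])
  · rintro ⟨hmem, hne'⟩
    rw [hsplit] at hmem
    rcases List.mem_append.mp hmem with h | h
    · exact h
    · simp at h; exact absurd h hne'

-- Python's max of a group is the last element of its sorted form
theorem getLast_eq_max (g s : List String) (hperm : s.Perm g) (hp : s.Pairwise (· < ·)) (hne : s ≠ []) :
    PySem.List.max? g (fun x => x) = some (s.getLast hne) := by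
  have hg : g ≠ [] := by
    intro h; subst h; exact hne (List.Perm.eq_nil hperm)
  obtain ⟨m, hm⟩ : ∃ m, PySem.List.max? g (fun x => x) = some m := by
    cases hmx : PySem.List.max? g (fun x => x) with
    | none => exact absurd ((PySem.List.max?_eq_none_iff g (fun x => x)).mp hmx) hg
    | some m => exact ⟨m, rfl⟩
  rw [hm]
  congr 1
  have hmg : m ∈ g := PySem.List.max?_mem hm
  have hmax : ∀ z ∈ g, z ≤ m := by
    intro z hz; exact PySem.List.max?_isMax hm z hz
  have hlastg : s.getLast hne ∈ g := hperm.mem_iff.mp (List.getLast_mem hne)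
  have hms : m ∈ s := hperm.mem_iff.mpr hmg
  by_contra hnem
  have hsplit := (List.dropLast_concat_getLast hne).symm
  have hmd : m ∈ s.dropLast := by
    rw [hsplit] at hms
    rcases List.mem_append.mp hms with h | h
    · exact h
    · simp at h; exact absurd h hnem
  have hlt : m < s.getLast hne := by
    have := hp
    rw [hsplit] at this
    exact (List.pairwise_append.mp this).2.2 m hmd _ (List.mem_singleton_self _)
  exact absurd (hmax _ hlastg) (not_le.mpr hlt)

-- the nonempty-intersection test of A and the any-test of B agree
theorem inter_nonempty_iff (g t : List String) :
    ((!(PySem.Set.inter g t).isEmpty) = true) ↔ ∃ e ∈ g, e ∈ t := by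
  rw [Bool.not_eq_eq_eq_not, Bool.not_true, List.isEmpty_eq_false_iff_exists_mem]
  constructor
  · rintro ⟨e, he⟩
    have := (PySem.Set.mem_inter g t e).mp he
    exact ⟨e, this.1, this.2⟩
  · rintro ⟨e, he, ht⟩
    exact ⟨e, (PySem.Set.mem_inter g t e).mpr ⟨he, ht⟩⟩

-- membership in contribA implies membership in the group
theorem mem_of_mem_contribA (keep g : List String) (y : String) (h : y ∈ contribA keep g) : y ∈ g := by
  unfold contribA at h
  split_ifs at h with h1 h2
  · simp at h
  · exact ((PySem.Set.mem_diff g keep y).mp h).1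
  · rw [PySem.List.slice_to_neg_one] at h
    exact (PySem.List.mem_sorted g (fun x => x) false y).mp (List.mem_of_mem_dropLast h)

-- the crux: for y with its own name-group G, y contributes to A's res iff B's predicate accepts y
theorem contrib_iff_predB (keep dset : List String) (hset : ∃ l, dset = PySem.Set.ofList l)
    (y : String) (hy : y ∈ dset) :
    (y ∈ contribA keep (dset.filter (fun e => name_dist e == name_dist y)) ↔ predB keep dset y = true) := by
  obtain ⟨l, rfl⟩ := hset
  set g := (PySem.Set.ofList l).filter (fun e => name_dist e == name_dist y) with hgdef
  have hyg : y ∈ g := by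
    rw [hgdef, List.mem_filter]
    exact ⟨hy, by simp⟩
  have hgne : g ≠ [] := List.ne_nil_of_mem hyg
  -- g is itself of the form Set.ofList _, so its sorted form is strictly increasing
  have hgofList : g = PySem.Set.ofList (l.filter (fun e => name_dist e == name_dist y)) :=
    (ofList_filter _ l).symm
  have hpair : (PySem.List.sorted g (fun x => x) false).Pairwise (· < ·) := by
    rw [hgofList]
    exact PySem.List.sorted_ofList_pairwise_lt _
  have hperm : (PySem.List.sorted g (fun x => x) false).Perm g := PySem.List.sorted_perm _ _ _
  have hsne : PySem.List.sorted g (fun x => x) false ≠ [] := by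
    intro h
    rw [h] at hperm
    exact hgne (List.Perm.eq_nil hperm.symm)
  have hmax := getLast_eq_max g _ hperm hpair hsne
  obtain ⟨a, t, hat⟩ := List.exists_cons_of_ne_nil hgne
  have hget : (statsOf keep (PySem.Set.ofList l)).get? (name_dist y)
      = some ((((a :: t).length : Nat) : Int), t.foldl max a,
          (a :: t).any (fun e => PySem.Set.contains keep e)) := by
    rw [statsOf_get? keep (PySem.Set.ofList l) (name_dist y), ← hgdef, hat]
  have hgetD := PySem.Dict.getD_of_get?_eq_some _ ((0 : Int), "", false) hget
  unfold contribA predB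
  rw [hgetD]
  dsimp only
  have hc1 : (PySem.Set.len g == 1) = ((((a :: t).length : Nat) : Int) == 1) := by
    rw [hat]; simp [PySem.Set.len]
  rw [hc1]
  by_cases h1 : ((((a :: t).length : Nat) : Int) == 1) = true
  · rw [if_pos h1, h1]
    simp
  · rw [if_neg h1, eq_false_of_ne_true h1]
    simp only [Bool.not_false, Bool.true_and]
    have hiff : ((!(PySem.Set.inter g keep).isEmpty) = true)
        ↔ (((a :: t).any fun e => PySem.Set.contains keep e) = true) := by
      rw [inter_nonempty_iff, List.any_eq_true, hat]
      constructor
      · rintro ⟨e, he, ht'⟩; exact ⟨e, he, (PySem.Set.contains_iff keep e).mpr ht'⟩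
      · rintro ⟨e, he, hc⟩; exact ⟨e, he, (PySem.Set.contains_iff keep e).mp hc⟩
    by_cases h2 : (((a :: t).any fun e => PySem.Set.contains keep e)) = true
    · rw [if_pos (hiff.mpr h2), if_pos h2]
      rw [PySem.Set.mem_diff]
      constructor
      · rintro ⟨-, hnk⟩
        cases hc : PySem.Set.contains keep y
        · rfl
        · exact absurd ((PySem.Set.contains_iff keep y).mp hc) hnk
      · intro hb
        refine ⟨hyg, fun hk => ?_⟩
        rw [(PySem.Set.contains_iff keep y).mpr hk] at hb
        simp at hb
    · rw [if_neg (fun hc => h2 (hiff.mp hc)), if_neg h2]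
      rw [PySem.List.slice_to_neg_one, mem_dropLast_strict _ hpair hsne y]
      have hmaxc : t.foldl max a = (PySem.List.sorted g (fun x => x) false).getLast hsne := by
        have hm2 : PySem.List.max? g (fun x => x) = some (t.foldl max a) := by
          rw [hat]; exact PySem.List.max?_id_cons a t
        exact Option.some.inj (hm2.symm.trans hmax)
      rw [← hmaxc]
      have hys : y ∈ PySem.List.sorted g (fun x => x) false :=
        (PySem.List.mem_sorted _ _ _ _).mpr hyg
      simp [hys]

-- B's fold is a filter by predB over the sorted dedup list
theorem alt_eq_filter (linked_dists keep_dists : List String) :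
    duplicates_to_remove_alt linked_dists keep_dists
      = (PySem.List.sorted (PySem.Set.ofList linked_dists) (fun x => x) false).filter
          (predB (PySem.Set.ofList keep_dists) (PySem.Set.ofList linked_dists)) := by
  unfold duplicates_to_remove_alt
  have hfun : (fun (res : List String) (d : String) =>
      if ((statsOf (PySem.Set.ofList keep_dists) (PySem.Set.ofList linked_dists)).getD (name_dist d) ((0 : Int), "", false)).1 == 1 then res
      else if ((statsOf (PySem.Set.ofList keep_dists) (PySem.Set.ofList linked_dists)).getD (name_dist d) ((0 : Int), "", false)).2.2 then
        (if !(PySem.Set.contains (PySem.Set.ofList keep_dists) d) then res ++ [d] else res)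
      else
        (if !(d == ((statsOf (PySem.Set.ofList keep_dists) (PySem.Set.ofList linked_dists)).getD (name_dist d) ((0 : Int), "", false)).2.1) then res ++ [d] else res))
      = (fun res d => if predB (PySem.Set.ofList keep_dists) (PySem.Set.ofList linked_dists) d then res ++ [d] else res) := by
    funext res d
    unfold predB
    by_cases h1 : (((statsOf (PySem.Set.ofList keep_dists) (PySem.Set.ofList linked_dists)).getD (name_dist d) ((0 : Int), "", false)).1 == 1) = true
    · rw [if_pos h1, h1]
      simp
    · rw [if_neg h1, eq_false_of_ne_true h1]
      simp only [Bool.not_false, Bool.true_and]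
      by_cases h2 : ((statsOf (PySem.Set.ofList keep_dists) (PySem.Set.ofList linked_dists)).getD (name_dist d) ((0 : Int), "", false)).2.2 = true
      · rw [if_pos h2, if_pos h2]
      · rw [if_neg h2, if_neg h2]
  simp only []
  rw [hfun, PySem.List.foldl_append_if
        (predB (PySem.Set.ofList keep_dists) (PySem.Set.ofList linked_dists)) (fun d => d)]
  simp

-- main equivalence
theorem main_eq (linked_dists keep_dists : List String) :
    duplicates_to_remove linked_dists keep_dists = duplicates_to_remove_alt linked_dists keep_dists := by
  rw [alt_eq_filter]
  unfold duplicates_to_remove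
  simp only []
  set keep := PySem.Set.ofList keep_dists with hkeep
  set dset := PySem.Set.ofList linked_dists with hdset
  set dict := linked_dists.foldl
    (fun dd dist => dd.modify (name_dist dist) [] (fun s => PySem.Set.add s dist))
    PySem.Dict.empty with hdict
  -- characterize the dict
  have hkeys : dict.keys = PySem.Set.ofList (linked_dists.map name_dist) := by
    rw [hdict, PySem.Dict.keys_foldl_modify_key linked_dists name_dist []
      (fun _ dist s => PySem.Set.add s dist) PySem.Dict.empty]
    rw [PySem.Dict.keys_empty, PySem.Set.update_nil_left]
  have hnd : dict.keys.Nodup := by rw [hkeys]; exact PySem.Set.nodup_ofList _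
  have hvals : dict.values = (PySem.Set.ofList (linked_dists.map name_dist)).map
      (fun k => PySem.Set.ofList (linked_dists.filter (fun e => name_dist e == k))) := by
    rw [PySem.Dict.values_eq_map_keys dict hnd [], hkeys]
    apply List.map_congr_left
    intro k _
    rw [hdict, dict_getD]
    simp [PySem.Set.update_nil_left]
  -- membership characterization of A's res
  have hmem : ∀ y, (y ∈ (PySem.Dict.values dict).foldl
      (fun res dists =>
        if PySem.Set.len dists == 1 then res
        else if !(PySem.Set.inter dists keep).isEmpty then
          PySem.Set.update res (PySem.Set.diff dists keep)
        else
          PySem.Set.update res (PySem.List.slice (PySem.List.sorted dists (fun x => x) false) none (some (-1))))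
      PySem.Set.empty)
      ↔ (y ∈ dset ∧ predB keep dset y = true) := by
    intro y
    rw [mem_resfold]
    simp only [PySem.Set.empty, List.not_mem_nil, false_or]
    constructor
    · rintro ⟨g, hg, hy⟩
      rw [hvals] at hg
      obtain ⟨k, _, rfl⟩ := List.mem_map.mp hg
      have hyg := mem_of_mem_contribA _ _ _ hy
      have hyk := (PySem.Set.mem_ofList _ _).mp hyg
      have hmemf := List.mem_filter.mp hyk
      have hnmy : name_dist y = k := by simpa using hmemf.2
      have hymem : y ∈ dset := by rw [hdset, PySem.Set.mem_ofList]; exact hmemf.1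
      refine ⟨hymem, ?_⟩
      rw [← contrib_iff_predB keep dset ⟨linked_dists, hdset⟩ y hymem]
      rw [hdset, ← ofList_filter, hnmy]
      exact hy
    · rintro ⟨hymem, hpred⟩
      refine ⟨PySem.Set.ofList (linked_dists.filter (fun e => name_dist e == name_dist y)), ?_, ?_⟩
      · rw [hvals]
        apply List.mem_map.mpr
        refine ⟨name_dist y, ?_, rfl⟩
        rw [PySem.Set.mem_ofList]
        exact List.mem_map.mpr ⟨y, (PySem.Set.mem_ofList _ _).mp (hdset ▸ hymem), rfl⟩
      · rw [← contrib_iff_predB keep dset ⟨linked_dists, hdset⟩ y hymem] at hpred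
        rw [hdset, ← ofList_filter] at hpred
        exact hpred
  -- both sides are the sorted/filtered strictly-increasing enumeration of the same set
  apply PySem.List.sorted_eq_of_perm_of_pairwise_lt
  · apply (List.perm_ext_iff_of_nodup ?_ ?_).mpr
    · intro y
      rw [List.mem_filter, PySem.List.mem_sorted, hmem]
    · exact List.Nodup.filter _
        ((PySem.List.sorted_perm dset (fun x => x) false).nodup_iff.mpr (PySem.Set.nodup_ofList _))
    · exact nodup_resfold _ _ _ (by simp [PySem.Set.empty])
  · exact List.Pairwise.filter _ (PySem.List.sorted_ofList_pairwise_lt _)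

-- ===== VERDICT (by name: the statement is the Claim_ definition above) =====
theorem duplicates_to_remove_spec : Claim_equal_duplicates_to_remove := by
  intro linked_dists keep_dists _
  unfold Spec_duplicates_to_remove
  exact main_eq linked_dists keep_dists
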